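-- pv_equiv track=rewrite | github.com/andypymont/adventofcode | 2015/day11.py | contains_three_consecutive_letters
-- ===== SOURCE A (Python) =====
-- def contains_three_consecutive_letters(password: str) -> bool:
--     """
--     Return True if the password has at least one occurrence of three consecutive letters, e.g. abc
--     or xyz, and False if it has no such ocurrences.
--     """
--     characters = [ord(char) for char in password]
--     return any(
--         (a + 1) == b and (b + 1) == c
--         for a, b, c in [
--             characters[x:x+3] for x in range(len(password) - 2)
--         ]
--     )
-- ===== SOURCE B (Python) =====
-- def contains_three_consecutive_letters(password: str) -> bool:
--     """Single pass keeping the length of the current ascending run (no slices built)."""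
--     run = 1
--     for i in range(1, len(password)):
--         if ord(password[i]) == ord(password[i - 1]) + 1:
--             run += 1
--             if run == 3:
--                 return True
--         else:
--             run = 1
--     return False
-- ===== Notes on version B (the rewrite author's own statement) =====
-- stated objective: simpler
-- what changed: Replaced the build-all-3-slices-then-any window enumeration with a single pass that maintains the length of the current ascending run and returns True the moment it reaches 3.
import Mathlib
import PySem

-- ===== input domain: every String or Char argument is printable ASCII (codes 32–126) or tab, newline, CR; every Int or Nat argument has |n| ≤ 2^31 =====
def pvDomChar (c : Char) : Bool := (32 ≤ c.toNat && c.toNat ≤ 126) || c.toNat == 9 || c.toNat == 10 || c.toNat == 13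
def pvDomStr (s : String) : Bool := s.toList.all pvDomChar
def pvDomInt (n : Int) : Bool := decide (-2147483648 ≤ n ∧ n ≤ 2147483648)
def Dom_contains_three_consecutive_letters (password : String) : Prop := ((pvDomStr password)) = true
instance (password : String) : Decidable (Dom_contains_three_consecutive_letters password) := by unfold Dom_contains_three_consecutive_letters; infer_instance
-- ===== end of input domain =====

-- B replaces A's enumeration of 3-character slices with a single pass tracking the
-- length of the current ascending run (simpler: no intermediate slices, early exit).

-- ===== PORT A =====
-- any((a+1)==b and (b+1)==c for a,b,c in [characters[x:x+3] for x in range(len(password)-2)])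
-- (the match arm '_ => false' can never fire: every slice taken has exactly 3 elements)
def contains_three_consecutive_letters (password : String) : Bool :=
  let characters : List Int := password.toList.map (fun ch => (ch.toNat : Int))
  ((PySem.List.pyRange 0 ((password.toList.length : Int) - 2) 1).map
      (fun x => PySem.List.slice characters (some x) (some (x + 3)))).any
    (fun w =>
      match w with
      | [a, b, c] => (a + 1 == b) && (b + 1 == c)
      | _ => false)

-- ===== PORT B =====
-- run-length loop of Source B: run starts at 1; each consecutive step increments it,
-- anything else resets it to 1; return True as soon as run reaches 3.
def pvRunLoop : List Char → Char → Nat → Bool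
  | [], _, _ => false
  | c :: rest, prev, run =>
    if prev.toNat + 1 = c.toNat then
      if run + 1 = 3 then true else pvRunLoop rest c (run + 1)
    else pvRunLoop rest c 1

def contains_three_consecutive_letters_alt (password : String) : Bool :=
  match password.toList with
  | [] => false
  | c :: rest => pvRunLoop rest c 1

-- ===== PRECONDITION & SPEC =====
def Spec_contains_three_consecutive_letters (password : String) (out : Bool) : Prop := out = contains_three_consecutive_letters_alt password
instance (password : String) (out : Bool) : Decidable (Spec_contains_three_consecutive_letters password out) := by unfold Spec_contains_three_consecutive_letters; infer_instance

-- ===== CLAIM (what is proved, stated in full; the proofs are below) =====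
def Claim_equal_contains_three_consecutive_letters : Prop := ∀ (password : String), Dom_contains_three_consecutive_letters password → Spec_contains_three_consecutive_letters password (contains_three_consecutive_letters password)

-- ===== LEMMAS AND PROOFS =====

-- common characterization: the list of characters contains an ascending triple
def pvHasTriple : List Char → Bool
  | a :: b :: c :: r =>
      (((a.toNat : Int) + 1 == (b.toNat : Int)) && ((b.toNat : Int) + 1 == (c.toNat : Int)))
        || pvHasTriple (b :: c :: r)
  | _ => false

lemma pvStep_eq (p c : Nat) : (((p : Int) + 1 == (c : Int)) : Bool) = decide (p + 1 = c) := by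
  have h : ((p : Int) + 1 == (c : Int)) = decide ((p : Int) + 1 = (c : Int)) := by
    simp [beq_eq_decide]
  rw [h]
  simp only [decide_eq_decide]
  omega

lemma pvRunLoop_cons (rest : List Char) (prev c : Char) (run : Nat) :
    pvRunLoop (c :: rest) prev run =
      if prev.toNat + 1 = c.toNat then
        (if run + 1 = 3 then true else pvRunLoop rest c (run + 1))
      else pvRunLoop rest c 1 := rfl

-- B side: the run-length loop computes pvHasTriple
lemma pvRunLoop_spec (l : List Char) : ∀ prev : Char,
    pvRunLoop l prev 1 = pvHasTriple (prev :: l) ∧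
    pvRunLoop l prev 2 =
      ((match l with
        | [] => false
        | c :: _ => decide (prev.toNat + 1 = c.toNat)) || pvHasTriple (prev :: l)) := by
  induction l with
  | nil => intro prev; simp [pvRunLoop, pvHasTriple]
  | cons c rest ih =>
    intro prev
    constructor
    · rw [pvRunLoop_cons]
      by_cases h : prev.toNat + 1 = c.toNat
      · rw [if_pos h, if_neg (by omega : ¬ (1 + 1 = 3)), (ih c).2]
        cases rest with
        | nil => simp [pvHasTriple]
        | cons d r => simp [pvHasTriple, h, pvStep_eq]
      · rw [if_neg h, (ih c).1]
        cases rest with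
        | nil => simp [pvHasTriple]
        | cons d r => simp [pvHasTriple, h, pvStep_eq]
    · rw [pvRunLoop_cons]
      by_cases h : prev.toNat + 1 = c.toNat
      · rw [if_pos h, if_pos (by omega : 2 + 1 = 3)]
        simp [h]
      · rw [if_neg h, (ih c).1]
        cases rest with
        | nil => simp [pvHasTriple, h]
        | cons d r => simp [pvHasTriple, h, pvStep_eq]

-- the window test A applies at one position
def pvWin (l : List Char) (k : Nat) : Bool :=
  match (l.map (fun ch => (ch.toNat : Int))).drop k |>.take 3 with
  | [a, b, c] => (a + 1 == b) && (b + 1 == c)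
  | _ => false

lemma pvAny_congr {α : Type} (l : List α) (p q : α → Bool) (h : ∀ x ∈ l, p x = q x) :
    l.any p = l.any q := by
  induction l with
  | nil => rfl
  | cons a tl ih =>
    simp only [List.any_cons]
    rw [h a (by simp), ih (fun x hx => h x (by simp [hx]))]

-- A side: window enumeration computes pvHasTriple
lemma pvAny_windows (l : List Char) :
    (List.range (l.length - 2)).any (fun k => pvWin l k) = pvHasTriple l := by
  induction l with
  | nil => simp [pvHasTriple]
  | cons a tl ih =>
    cases tl with
    | nil => simp [pvHasTriple]
    | cons b tl2 =>
      cases tl2 with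
      | nil => simp [pvHasTriple]
      | cons c r =>
        have hlen : (a :: b :: c :: r).length - 2 = r.length + 1 := by simp
        rw [hlen, List.range_succ_eq_map, List.any_cons, List.any_map]
        have hshift : ∀ k : Nat, pvWin (a :: b :: c :: r) (k + 1) = pvWin (b :: c :: r) k := by
          intro k; simp [pvWin]
        have hrest : (List.range r.length).any (fun k => pvWin (b :: c :: r) k)
            = pvHasTriple (b :: c :: r) := by simpa using ih
        rw [pvAny_congr _ _ _ (fun k _ => by simp only [Function.comp_def]; exact hshift k), hrest]
        simp [pvWin, pvHasTriple]

lemma portA_eq_hasTriple (password : String) :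
    contains_three_consecutive_letters password = pvHasTriple password.toList := by
  unfold contains_three_consecutive_letters
  rw [← pvAny_windows]
  set l := password.toList with hl
  rw [List.any_map, PySem.List.pyRange_one]
  have h0 : ((l.length : Int) - 2 - 0).toNat = l.length - 2 := by omega
  rw [h0, List.any_map]
  apply pvAny_congr
  intro k _
  simp only [Function.comp_def, zero_add]
  rw [show ((k : Int) + 3) = ((k : Int) + ((3 : Nat) : Int)) from by norm_num,
    PySem.List.slice_natCast_add]
  rfl

lemma portB_eq_hasTriple (password : String) :
    contains_three_consecutive_letters_alt password = pvHasTriple password.toList := by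
  unfold contains_three_consecutive_letters_alt
  cases h : password.toList with
  | nil => simp [pvHasTriple]
  | cons c rest => exact (pvRunLoop_spec rest c).1

-- ===== VERDICT (by name: the statement is the Claim_ definition above) =====
theorem contains_three_consecutive_letters_spec : Claim_equal_contains_three_consecutive_letters := by
  intro password _
  unfold Spec_contains_three_consecutive_letters
  rw [portA_eq_hasTriple, portB_eq_hasTriple]
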